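-- pv_equiv track=rewrite | github.com/Colvchap/GeneFinder | gene_finder.py | rest_of_ORF
-- ===== SOURCE A (Python) =====
-- def rest_of_ORF(dna):
--     """ Takes a DNA sequence that is assumed to begin with a start
--         codon and returns the sequence up to but not including the
--         first in frame stop codon.  If there is no in frame stop codon,
--         returns the whole string.
--         dna: a DNA sequence
--         returns: the open reading frame represented as a string
--     >>> rest_of_ORF("ATGTGAA")
--     'ATG'
--     >>> rest_of_ORF("ATGAGATAGG")
--     'ATGAGA'
--     """
--     separate_dna = []
--     for nucleotide in dna:          # constructs list of nucleotides
--         separate_dna.append(nucleotide)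
--     p = 0
--     three_prime_end = ''
--     while True:
--         if len(dna) - p <= 2:
--                 return dna
--         else:
--             codon = separate_dna[p] + separate_dna[p+1] + separate_dna[p+2]
--
--             if codon == "TAG" or codon == "TAA" or codon == "TGA":
--                 if p >= 3:
--                     return three_prime_end
--             p += 3
--             three_prime_end = three_prime_end + codon
-- ===== SOURCE B (Python) =====
-- def rest_of_ORF(dna):
--     stops = ("TAA", "TAG", "TGA")
--     k = next((i for i in range(3, len(dna) - 2, 3) if dna[i:i+3] in stops), None)
--     return dna if k is None else dna[:k]
-- ===== Notes on version B (the rewrite author's own statement) =====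
-- stated objective: idiomatic
-- what changed: A's while loop that builds the answer codon-by-codon in a string accumulator (after first exploding dna into a char list) is replaced by a direct first-match search (next over range(3, len(dna)-2, 3)) for the first in-frame stop codon, followed by a single slice dna[:k]; no char list and no string accumulation.
import Mathlib
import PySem

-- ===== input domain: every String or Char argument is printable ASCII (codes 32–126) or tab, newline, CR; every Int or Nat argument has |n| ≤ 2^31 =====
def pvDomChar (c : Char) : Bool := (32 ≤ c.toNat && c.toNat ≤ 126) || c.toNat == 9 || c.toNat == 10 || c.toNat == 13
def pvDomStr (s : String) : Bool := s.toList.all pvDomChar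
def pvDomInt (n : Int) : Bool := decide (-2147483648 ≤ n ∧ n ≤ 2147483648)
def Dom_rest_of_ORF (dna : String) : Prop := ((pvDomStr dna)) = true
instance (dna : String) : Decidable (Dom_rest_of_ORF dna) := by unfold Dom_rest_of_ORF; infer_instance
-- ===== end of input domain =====

-- B replaces A's accumulator-building while loop by a direct first-match search over
-- the in-frame codon start positions (idiomatic, no accumulator); same return value.

-- ===== PORT A =====
-- the while loop: p is the codon start, acc is three_prime_end (as a char list);
-- `codon` (= chars p, p+1, p+2) is inlined at its uses; Python's nested
-- `if stop: if p >= 3: return acc` plus fall-through is the combined condition below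
def restA_loop (s : List Char) (p : Nat) (acc : List Char) : List Char :=
  if s.length - p ≤ 2 then s
  else
    if ([s.getD p ' ', s.getD (p+1) ' ', s.getD (p+2) ' '] = ['T','A','G'] ∨
        [s.getD p ' ', s.getD (p+1) ' ', s.getD (p+2) ' '] = ['T','A','A'] ∨
        [s.getD p ' ', s.getD (p+1) ' ', s.getD (p+2) ' '] = ['T','G','A']) ∧ 3 ≤ p then acc
    else restA_loop s (p+3) (acc ++ [s.getD p ' ', s.getD (p+1) ' ', s.getD (p+2) ' '])
termination_by s.length - p
decreasing_by omega

def rest_of_ORF (dna : String) : String :=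
  String.ofList (restA_loop dna.toList 0 [])

-- ===== PORT B =====
-- `dna[i:i+3] in ("TAA", "TAG", "TGA")`
def pvIsStop (c : List Char) : Bool :=
  c = ['T','A','A'] || c = ['T','A','G'] || c = ['T','G','A']

-- k = next((i for i in range(3, len(dna) - 2, 3) if dna[i:i+3] in stops), None)
-- return dna if k is None else dna[:k]
def rest_of_ORF_alt (dna : String) : String :=
  match (PySem.List.pyRange 3 ((dna.toList.length : Int) - 2) 3).find?
      (fun i => pvIsStop (PySem.List.slice dna.toList (some i) (some (i+3)))) with
  | none => dna
  | some k => String.ofList (PySem.List.slice dna.toList none (some k))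

-- ===== PRECONDITION & SPEC =====
def Spec_rest_of_ORF (dna : String) (out : String) : Prop := out = rest_of_ORF_alt dna
instance (dna : String) (out : String) : Decidable (Spec_rest_of_ORF dna out) := by unfold Spec_rest_of_ORF; infer_instance

-- ===== CLAIM (what is proved, stated in full; the proofs are below) =====
def Claim_equal_rest_of_ORF : Prop := ∀ (dna : String), Dom_rest_of_ORF dna → Spec_rest_of_ORF dna (rest_of_ORF dna)

-- ===== LEMMAS AND PROOFS =====

lemma pvIsStop_iff (c : List Char) : pvIsStop c = true ↔
    (c = ['T','A','G'] ∨ c = ['T','A','A'] ∨ c = ['T','G','A']) := by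
  unfold pvIsStop
  simp only [Bool.or_eq_true, decide_eq_true_eq]
  tauto

lemma pyRange3_nil (a b : Int) (h : b ≤ a) : PySem.List.pyRange a b 3 = [] := by
  rw [PySem.List.pyRange_of_pos _ _ (by norm_num)]
  simp [if_neg (not_lt.mpr h)]

lemma pyRange3_cons (a b : Int) (h : a < b) :
    PySem.List.pyRange a b 3 = a :: PySem.List.pyRange (a+3) b 3 := by
  rw [PySem.List.pyRange_of_pos _ _ (by norm_num : (0:Int) < 3),
      PySem.List.pyRange_of_pos _ _ (by norm_num : (0:Int) < 3)]
  have hn : (if a < b then ((b - a + 3 - 1) / 3).toNat else 0)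
      = (if a + 3 < b then ((b - (a + 3) + 3 - 1) / 3).toNat else 0) + 1 := by
    split_ifs <;> omega
  rw [hn, List.range_succ_eq_map, List.map_cons, List.map_map]
  congr 1
  · norm_num
  · apply List.map_congr_left
    intro k _
    simp only [Function.comp_apply, Nat.succ_eq_add_one]
    push_cast
    ring

lemma drop_three (s : List Char) (p : Nat) (h : p + 3 ≤ s.length) :
    (s.drop p).take 3 = [s.getD p ' ', s.getD (p+1) ' ', s.getD (p+2) ' '] := by
  have hlen : 3 ≤ (s.drop p).length := by simp; omega
  obtain ⟨a, b, c, t3, hd⟩ : ∃ a b c t3, s.drop p = a :: b :: c :: t3 := by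
    rcases hsp : s.drop p with _ | ⟨a, t1⟩
    · rw [hsp] at hlen; simp at hlen
    · rcases t1 with _ | ⟨b, t2⟩
      · rw [hsp] at hlen; simp at hlen
      · rcases t2 with _ | ⟨c, t3⟩
        · rw [hsp] at hlen; simp at hlen
        · exact ⟨a, b, c, t3, rfl⟩
  have g0 : s.getD p ' ' = a := by
    rw [List.getD_eq_getElem?_getD, ← Nat.add_zero p, ← List.getElem?_drop, hd]; rfl
  have g1 : s.getD (p+1) ' ' = b := by
    rw [List.getD_eq_getElem?_getD, ← List.getElem?_drop, hd]; rfl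
  have g2 : s.getD (p+2) ' ' = c := by
    rw [List.getD_eq_getElem?_getD, ← List.getElem?_drop, hd]; rfl
  rw [hd, g0, g1, g2]
  simp

lemma take_three_more (s : List Char) (p : Nat) (h : p + 3 ≤ s.length) :
    s.take p ++ [s.getD p ' ', s.getD (p+1) ' ', s.getD (p+2) ' '] = s.take (p+3) := by
  have e1 : s.take (p+1) = s.take p ++ [s.getD p ' '] := by
    rw [List.take_add_one, List.getD_eq_getElem?_getD, List.getElem?_eq_getElem (by omega)]
    rfl
  have e2 : s.take (p+2) = s.take (p+1) ++ [s.getD (p+1) ' '] := by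
    rw [show p + 2 = (p+1) + 1 by ring, List.take_add_one, List.getD_eq_getElem?_getD,
      List.getElem?_eq_getElem (by omega)]
    rfl
  have e3 : s.take (p+3) = s.take (p+2) ++ [s.getD (p+2) ' '] := by
    rw [show p + 3 = (p+2) + 1 by ring, List.take_add_one, List.getD_eq_getElem?_getD,
      List.getElem?_eq_getElem (by omega)]
    rfl
  rw [e3, e2, e1]
  simp

lemma slice_codon (s : List Char) (p : Nat) :
    PySem.List.slice s (some (p : Int)) (some ((p : Int) + 3)) = (s.drop p).take 3 := by
  have := PySem.List.slice_natCast_add s p 3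
  norm_num at this
  exact this

-- the invariant of A's loop, for p ≥ 3, acc = dna[:p]
lemma loop_key (n : Nat) : ∀ (s : List Char) (p : Nat), s.length - p ≤ n → 3 ≤ p →
    restA_loop s p (s.take p) =
      (match (PySem.List.pyRange (p : Int) ((s.length : Int) - 2) 3).find?
          (fun i => pvIsStop (PySem.List.slice s (some i) (some (i+3)))) with
       | none => s
       | some k => PySem.List.slice s none (some k)) := by
  induction n with
  | zero =>
    intro s p hn hp
    rw [restA_loop, if_pos (by omega),
      pyRange3_nil _ _ (by omega), List.find?_nil]
  | succ m ih =>
    intro s p hn hp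
    by_cases hend : s.length - p ≤ 2
    · rw [restA_loop, if_pos hend, pyRange3_nil _ _ (by omega), List.find?_nil]
    · have hlen : p + 3 ≤ s.length := by omega
      rw [restA_loop, if_neg hend,
        pyRange3_cons _ _ (by omega), List.find?_cons]
      rw [slice_codon, drop_three s p hlen]
      by_cases hstop : [s.getD p ' ', s.getD (p+1) ' ', s.getD (p+2) ' '] = ['T','A','G'] ∨
          [s.getD p ' ', s.getD (p+1) ' ', s.getD (p+2) ' '] = ['T','A','A'] ∨
          [s.getD p ' ', s.getD (p+1) ' ', s.getD (p+2) ' '] = ['T','G','A']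
      · have hb : pvIsStop [s.getD p ' ', s.getD (p+1) ' ', s.getD (p+2) ' '] = true :=
          (pvIsStop_iff _).mpr hstop
        rw [if_pos ⟨hstop, hp⟩]
        simp only [hb]
        rw [PySem.List.slice_to_natCast]
      · have hb : pvIsStop [s.getD p ' ', s.getD (p+1) ' ', s.getD (p+2) ' '] = false := by
          rw [← Bool.not_eq_true, pvIsStop_iff]
          exact hstop
        rw [if_neg (by tauto)]
        simp only [hb]
        rw [take_three_more s p hlen]
        have hih := ih s (p+3) (by omega) (by omega)
        push_cast at hih ⊢
        rw [hih]

-- ===== VERDICT (by name: the statement is the Claim_ definition above) =====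
theorem rest_of_ORF_spec : Claim_equal_rest_of_ORF := by
  intro dna _
  unfold Spec_rest_of_ORF rest_of_ORF rest_of_ORF_alt
  set s := dna.toList with hs
  by_cases hshort : s.length ≤ 2
  · rw [restA_loop, if_pos (by omega), pyRange3_nil _ _ (by omega), List.find?_nil]
    exact String.ofList_toList
  · have hlen : 0 + 3 ≤ s.length := by omega
    rw [restA_loop, if_neg (by omega), if_neg (fun h => absurd h.2 (by omega))]
    have hacc : ([] : List Char) ++ [s.getD 0 ' ', s.getD (0+1) ' ', s.getD (0+2) ' ']
        = s.take 3 := by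
      have := take_three_more s 0 hlen
      simpa using this
    norm_num at hacc ⊢
    rw [hacc]
    have hkey := loop_key s.length s 3 (by omega) (le_refl 3)
    push_cast at hkey
    rw [show (s.take 3 : List Char) = s.take (3 : Nat) from rfl, hkey]
    rcases hfind : (PySem.List.pyRange (3 : Int) ((s.length : Int) - 2) 3).find?
        (fun i => pvIsStop (PySem.List.slice s (some i) (some (i+3)))) with _ | k
    · exact String.ofList_toList
    · rfl
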